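-- pv_equiv track=rewrite | github.com/BGSU-RNA/JAR3D-Website | app/views.py | make_input_alignment
-- ===== SOURCE A (Python) =====
-- def make_input_alignment(parsed_input, query_type):
--     # If input is just one loop, just return the sequences
--     loops = ['isFastaSingleLoop',
--              'isNoFastaSingleLoop',
--              'isFastaMultipleLoops',
--              'isNoFastaMultipleLoops']
--     if query_type in loops:
--         return parsed_input
--     # Get info about query
--     query_lines = parsed_input.splitlines()
--     # has_ss = False
--     # has_fasta = False
--     # fasta = ['isFastaSingleSequenceSS',
--     #          'isFastaMultipleSequencesSS',
--     #          'isFastaSingleSequenceNoSS',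
--     #          'isFastaMultipleSequencesNoSS',
--     #          'isRfamFamily']
--     # SSs = ['isFastaSingleSequenceSS',
--     #        'isNoFastaSingleSequenceSS',
--     #        'isFastaMultipleSequencesSS',
--     #        'isNoFastaMultipleSequencesSS']
--     # if query_type in fasta:
--     #     has_fasta = True
--     # if query_type in SSs:
--     #     has_ss = True
--
--     # Make formatted alignment for display
--     # Use the last sequence line to get the length
--     seq_length = len(query_lines[-1])
--
--     # make header lines telling column number; nice if we could make it not scroll
--     l = []
--     # 1000s place
--     if seq_length >= 1000:
--         for i in range(1, seq_length+1):
--             l.append(str(i % 10000//1000))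
--         l.append('\n')
--     # 100s place
--     if seq_length >= 100:
--         for i in range(1, seq_length+1):
--             l.append(str(i % 1000//100))
--         l.append('\n')
--     if seq_length >= 10:
--         for i in range(1, seq_length+1):
--             l.append(str(i % 100//10))
--         l.append('\n')
--     for i in range(1, seq_length+1):
--         l.append(str(i % 10))
--     l.append('\n')
--     # l.append('='*seq_length+'\n')
--     line = 0
--     while line < len(query_lines):
--         l.append(query_lines[line] + '\n')
--         line += 1
--     out = ''.join(l)
--     return out
-- ===== SOURCE B (Python) =====
-- def make_input_alignment(parsed_input, query_type):
--     # Single-loop query types: just return the sequences unchanged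
--     if query_type in ('isFastaSingleLoop', 'isNoFastaSingleLoop',
--                       'isFastaMultipleLoops', 'isNoFastaMultipleLoops'):
--         return parsed_input
--     lines = parsed_input.splitlines()
--     seq_length = len(lines[-1])
--     # number of header rows: ones, tens, hundreds, thousands (capped at 4)
--     w = 1 + (seq_length >= 10) + (seq_length >= 100) + (seq_length >= 1000)
--     # one w-digit column string per position, then transpose into header rows
--     cols = [str(i % 10 ** w).zfill(w) for i in range(1, seq_length + 1)]
--     header = ''.join(''.join(col[r] for col in cols) + '\n' for r in range(w))
--     return header + ''.join(line + '\n' for line in lines)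
-- ===== Notes on version B (the rewrite author's own statement) =====
-- stated objective: simpler
-- what changed: A emits the column-number header with one hand-written loop per decimal place (place-outer, column-inner, duplicated four times with magnitude guards); B builds one zero-filled w-digit string per column and transposes those column strings into the w header rows, then appends the query lines.
import Mathlib
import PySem

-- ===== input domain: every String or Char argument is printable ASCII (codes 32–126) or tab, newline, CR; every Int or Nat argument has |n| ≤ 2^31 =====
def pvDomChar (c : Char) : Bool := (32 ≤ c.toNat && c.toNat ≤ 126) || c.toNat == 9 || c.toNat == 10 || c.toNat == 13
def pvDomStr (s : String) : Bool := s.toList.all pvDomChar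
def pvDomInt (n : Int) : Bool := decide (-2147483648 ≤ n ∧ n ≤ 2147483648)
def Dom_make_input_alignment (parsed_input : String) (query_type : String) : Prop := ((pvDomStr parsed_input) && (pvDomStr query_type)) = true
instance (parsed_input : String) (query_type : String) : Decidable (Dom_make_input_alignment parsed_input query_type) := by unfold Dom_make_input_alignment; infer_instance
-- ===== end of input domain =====

-- B replaces A's four hand-written per-decimal-place header loops by building one zero-filled
-- w-digit string per column and transposing those column strings into the header rows (simpler).

-- ===== PORT A =====
def make_input_alignment (parsed_input : String) (query_type : String) : String :=
  let loops : List String :=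
    ["isFastaSingleLoop", "isNoFastaSingleLoop", "isFastaMultipleLoops", "isNoFastaMultipleLoops"]
  if query_type ∈ loops then parsed_input
  else
    let query_lines := PySem.Str.splitlines parsed_input
    -- query_lines[-1]: IndexError (none) on empty input, excluded by Pre_
    match PySem.List.pyGet? query_lines (-1) with
    | none => ""
    | some lastLine =>
      let seq_length : Int := PySem.Str.len lastLine
      let l : List String := []
      let l := if 1000 ≤ seq_length then
          ((PySem.List.pyRange 1 (seq_length + 1) 1).foldl
            (fun acc i => acc ++ [PySem.Int.toStr (PySem.Int.floordiv (PySem.Int.mod i 10000) 1000)]) l) ++ ["\n"]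
        else l
      let l := if 100 ≤ seq_length then
          ((PySem.List.pyRange 1 (seq_length + 1) 1).foldl
            (fun acc i => acc ++ [PySem.Int.toStr (PySem.Int.floordiv (PySem.Int.mod i 1000) 100)]) l) ++ ["\n"]
        else l
      let l := if 10 ≤ seq_length then
          ((PySem.List.pyRange 1 (seq_length + 1) 1).foldl
            (fun acc i => acc ++ [PySem.Int.toStr (PySem.Int.floordiv (PySem.Int.mod i 100) 10)]) l) ++ ["\n"]
        else l
      let l := ((PySem.List.pyRange 1 (seq_length + 1) 1).foldl
          (fun acc i => acc ++ [PySem.Int.toStr (PySem.Int.mod i 10)]) l) ++ ["\n"]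
      -- while line < len(query_lines): l.append(query_lines[line] + '\n')
      let l := (PySem.List.pyRange 0 (PySem.List.len query_lines) 1).foldl
          (fun acc line => acc ++ [PySem.List.pyGetD query_lines line "" ++ "\n"]) l
      PySem.Str.join "" l

-- ===== PORT B =====
def make_input_alignment_alt (parsed_input : String) (query_type : String) : String :=
  if query_type ∈ ["isFastaSingleLoop", "isNoFastaSingleLoop", "isFastaMultipleLoops", "isNoFastaMultipleLoops"] then
    parsed_input
  else
    let lines := PySem.Str.splitlines parsed_input
    match PySem.List.pyGet? lines (-1) with
    | none => ""
    | some lastLine =>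
      let seq_length : Int := PySem.Str.len lastLine
      let w : Int := 1 + (if 10 ≤ seq_length then 1 else 0) + (if 100 ≤ seq_length then 1 else 0)
                       + (if 1000 ≤ seq_length then 1 else 0)
      let cols : List String := (PySem.List.pyRange 1 (seq_length + 1) 1).map
          (fun i => PySem.Str.zfill (PySem.Int.toStr (PySem.Int.mod i ((10 : Int) ^ w.toNat))) w)
      -- ''.join(col[r] for col in cols): a join of single-character strings = the string of those
      -- characters; col[r] never misses since r < w ≤ len(col)
      let header := PySem.Str.join "" ((PySem.List.pyRange 0 w 1).map
          (fun r => String.ofList (cols.map (fun col => (PySem.Str.pyGet? col r).getD ' ')) ++ "\n"))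
      header ++ PySem.Str.join "" (lines.map (fun line => line ++ "\n"))

-- ===== PRECONDITION & SPEC =====
-- Pre_ excludes only the inputs where A raises: an empty parsed_input with a non-single-loop
-- query_type makes query_lines[-1] an IndexError (B raises there too).
def Pre_make_input_alignment (parsed_input : String) (query_type : String) : Prop :=
  parsed_input ≠ "" ∨
    query_type ∈ ["isFastaSingleLoop", "isNoFastaSingleLoop", "isFastaMultipleLoops", "isNoFastaMultipleLoops"]
instance (parsed_input : String) (query_type : String) : Decidable (Pre_make_input_alignment parsed_input query_type) := by
  unfold Pre_make_input_alignment; infer_instance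
def pvWitness_make_input_alignment : String × String := ("GGCGCAUAACGC\nGGCGCAUAACGC", "isFastaSingleSequenceSS")
def Spec_make_input_alignment (parsed_input : String) (query_type : String) (out : String) : Prop := out = make_input_alignment_alt parsed_input query_type
instance (parsed_input : String) (query_type : String) (out : String) : Decidable (Spec_make_input_alignment parsed_input query_type out) := by unfold Spec_make_input_alignment; infer_instance

-- ===== CLAIM (what is proved, stated in full; the proofs are below) =====
def Claim_equal_make_input_alignment : Prop := ∀ (parsed_input : String) (query_type : String), Dom_make_input_alignment parsed_input query_type → Pre_make_input_alignment parsed_input query_type → Spec_make_input_alignment parsed_input query_type (make_input_alignment parsed_input query_type)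

-- ===== LEMMAS AND PROOFS =====


theorem pvToDigitsCore_eq (m : Nat) : ∀ (f g : Nat) (acc : List Char), m < f → m < g →
    Nat.toDigitsCore 10 f m acc = Nat.toDigitsCore 10 g m [] ++ acc := by
  induction m using Nat.strong_induction_on with
  | _ m ih =>
    intro f g acc hf hg
    cases f with
    | zero => omega
    | succ f =>
      cases g with
      | zero => omega
      | succ g =>
        simp only [Nat.toDigitsCore]
        by_cases h0 : m / 10 = 0
        · simp [h0]
        · simp only [h0, if_false]
          have hlt : m / 10 < m := Nat.div_lt_self (by omega) (by omega)
          rw [ih (m/10) hlt f (m/10 + 1) _ (by omega) (by omega),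
              ih (m/10) hlt g (m/10 + 1) _ (by omega) (by omega)]
          simp

theorem pvToDigits_succ (n : Nat) (h : 10 ≤ n) :
    Nat.toDigits 10 n = Nat.toDigits 10 (n / 10) ++ [Nat.digitChar (n % 10)] := by
  show Nat.toDigitsCore 10 (n+1) n [] = _
  simp only [Nat.toDigitsCore]
  have h0 : ¬ (n / 10 = 0) := by omega
  simp only [h0, if_false]
  rw [pvToDigitsCore_eq (n/10) n (n/10 + 1) _ (by omega) (by omega)]
  rfl

theorem pvDigitChar_ne_sign (d : Nat) : Nat.digitChar d ≠ '+' ∧ Nat.digitChar d ≠ '-' := by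
  by_cases h : d < 16
  · interval_cases d <;> exact ⟨by decide, by decide⟩
  · have e : Nat.digitChar d = '*' := by
      unfold Nat.digitChar
      rw [if_neg (by omega), if_neg (by omega), if_neg (by omega), if_neg (by omega),
          if_neg (by omega), if_neg (by omega), if_neg (by omega), if_neg (by omega),
          if_neg (by omega), if_neg (by omega), if_neg (by omega), if_neg (by omega),
          if_neg (by omega), if_neg (by omega), if_neg (by omega), if_neg (by omega)]
    rw [e]; exact ⟨by decide, by decide⟩

theorem pvPad (w : Nat) : ∀ n : Nat, 0 < w → n < 10 ^ w →
    List.replicate (w - (Nat.toDigits 10 n).length) '0' ++ Nat.toDigits 10 n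
      = (List.range w).map (fun r => Nat.digitChar (n / 10 ^ (w - 1 - r) % 10)) := by
  induction w with
  | zero => omega
  | succ w ih =>
    intro n _ hn
    by_cases hw : w = 0
    · subst hw
      have h10 : n < 10 := by omega
      rw [Nat.toDigits_of_lt_base h10]
      simp [Nat.mod_eq_of_lt h10]
    · have hw0 : 0 < w := by omega
      by_cases hsmall : n < 10 ^ w
      · have hlen : (Nat.toDigits 10 n).length ≤ w := Nat.toDigits_length 10 n w hw0 hsmall
        have hrep : w + 1 - (Nat.toDigits 10 n).length = (w - (Nat.toDigits 10 n).length) + 1 := by omega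
        rw [hrep, List.replicate_succ, List.cons_append, ih n hw0 hsmall]
        have hr : List.range (w + 1) = 0 :: (List.range w).map (· + 1) := by
          simp [List.range_succ_eq_map]
        rw [hr, List.map_cons, List.map_map]
        have hd : n / 10 ^ (w + 1 - 1 - 0) % 10 = 0 := by
          simp [Nat.div_eq_of_lt hsmall]
        rw [hd]
        have hh : '0' = Nat.digitChar 0 := by decide
        rw [← hh]
        congr 1
        apply List.map_congr_left
        intro r hr'
        have he : w - 1 - r = w + 1 - 1 - (r + 1) := by omega
        simp only [Function.comp]
        rw [he]
      · have h10 : 10 ≤ n := by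
          have : 10 ≤ 10 ^ w := by
            calc 10 = 10 ^ 1 := by norm_num
            _ ≤ 10 ^ w := Nat.pow_le_pow_right (by omega) hw0
          omega
        rw [pvToDigits_succ n h10]
        have hq : n / 10 < 10 ^ w := by
          rw [Nat.div_lt_iff_lt_mul (by omega)]
          calc n < 10 ^ (w + 1) := hn
          _ = 10 ^ w * 10 := by ring
        have hlen2 : (Nat.toDigits 10 (n / 10)).length ≤ w := Nat.toDigits_length 10 (n/10) w hw0 hq
        rw [List.length_append]
        have hrep : w + 1 - ((Nat.toDigits 10 (n/10)).length + [Nat.digitChar (n % 10)].length)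
            = w - (Nat.toDigits 10 (n/10)).length := by
          simp only [List.length_singleton]; omega
        rw [hrep, ← List.append_assoc, ih (n/10) hw0 hq]
        rw [List.range_succ, List.map_append]
        congr 1
        · apply List.map_congr_left
          intro r hr'
          have hre : r < w := List.mem_range.mp hr'
          have he1 : w + 1 - 1 - r = (w - 1 - r) + 1 := by omega
          rw [he1, pow_succ', ← Nat.div_div_eq_div_mul]
        · simp

theorem pvToChars_natCast (k : Nat) : PySem.Int.toChars (k : Int) = Nat.toDigits 10 k := by
  unfold PySem.Int.toChars
  rw [if_neg (by omega)]
  simp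

theorem pvZfill (w : Nat) (n : Nat) (hw : 0 < w) (hn : n < 10 ^ w) :
    PySem.Chars.zfill (PySem.Int.toChars (n : Int)) (w : Int)
      = (List.range w).map (fun r => Nat.digitChar (n / 10 ^ (w - 1 - r) % 10)) := by
  rw [pvToChars_natCast, ← pvPad w n hw hn]
  have hlen : (Nat.toDigits 10 n).length ≤ w := Nat.toDigits_length 10 n w hw hn
  by_cases heq : (Nat.toDigits 10 n).length = w
  · rw [PySem.Chars.zfill.eq_def, if_pos (by exact_mod_cast le_of_eq heq.symm)]
    rw [heq]
    simp
  · rw [PySem.Chars.zfill.eq_def, if_neg (by omega)]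
    rcases hd : Nat.toDigits 10 n with _ | ⟨c, rest⟩
    · simp
    · have hcmem : c ∈ List.replicate (w - (Nat.toDigits 10 n).length) '0' ++ Nat.toDigits 10 n :=
        List.mem_append_right _ (by rw [hd]; exact List.mem_cons_self)
      rw [pvPad w n hw hn] at hcmem
      obtain ⟨r, _, hr⟩ := List.mem_map.mp hcmem
      split
      next c1 rest1 heq1 =>
        rcases heq1 with ⟨rfl, rfl⟩
        rw [if_neg]
        · simp
        · rw [← hr]
          exact fun hor => hor.elim (fun h => (pvDigitChar_ne_sign _).1 h)
            (fun h => (pvDigitChar_ne_sign _).2 h)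
      next heq1 => exact absurd heq1 (by simp)

theorem pvGo_ne_nil (isB : Char → Bool) (cs cur : List Char) (acc : List (List Char))
    (h : cur ≠ [] ∨ acc ≠ []) : PySem.Chars.splitlines.go isB cs cur acc ≠ [] := by
  induction cs, cur, acc using PySem.Chars.splitlines.go.induct isB with
  | case1 cur acc hc =>
    rw [PySem.Chars.splitlines.go.eq_def]
    simp only [hc, if_true]
    have hacc : acc ≠ [] := by
      rcases h with h' | h'
      · exact absurd (List.isEmpty_iff.mp hc) h'
      · exact h'
    simpa using hacc
  | case2 cur acc hc =>
    rw [PySem.Chars.splitlines.go.eq_def]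
    simp only [hc]
    simp
  | case3 rest cur acc ih =>
    rw [PySem.Chars.splitlines.go.eq_def]
    exact ih (Or.inr (by simp))
  | case4 c rest cur acc hne hB ih =>
    rw [PySem.Chars.splitlines.go.eq_def]
    split
    next heq => exact absurd heq (by simp)
    next r2 heq =>
      injection heq with h1 h2
      exact (hne r2 h1 h2).elim
    next c2 r2 hne2 heq =>
      injection heq with h1 h2
      subst h1; subst h2
      rw [if_pos hB]
      exact ih (Or.inr (by simp))
  | case5 c rest cur acc hne hB ih =>
    rw [PySem.Chars.splitlines.go.eq_def]
    split
    next heq => exact absurd heq (by simp)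
    next r2 heq =>
      injection heq with h1 h2
      exact (hne r2 h1 h2).elim
    next c2 r2 hne2 heq =>
      injection heq with h1 h2
      subst h1; subst h2
      rw [if_neg (by simpa using hB)]
      exact ih (Or.inl (by simp))

theorem pvSplitlines_ne_nil (s : String) (h : s ≠ "") : PySem.Str.splitlines s ≠ [] := by
  have hl : s.toList ≠ [] := by
    intro he
    exact h (String.toList_inj.mp (by simpa using he))
  intro hnil
  have hc : PySem.Chars.splitlines s.toList = [] := by
    have hb := PySem.Str.splitlines_map_toList s
    rw [hnil] at hb
    simpa using hb.symm
  rcases hs : s.toList with _ | ⟨c, rest⟩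
  · exact hl hs
  · rw [hs] at hc
    unfold PySem.Chars.splitlines at hc
    revert hc
    rw [PySem.Chars.splitlines.go.eq_def]
    split
    next heq => exact absurd heq (by simp)
    next r2 heq => exact pvGo_ne_nil _ _ _ _ (Or.inr (by simp))
    next c2 r2 hne2 heq =>
      split_ifs with hB
      · exact pvGo_ne_nil _ _ _ _ (Or.inr (by simp))
      · exact pvGo_ne_nil _ _ _ _ (Or.inl (by simp))

theorem pvFlatten_map_singleton {α β : Type} (l : List α) (f : α → β) :
    (l.map (fun x => [f x])).flatten = l.map f := by
  induction l with
  | nil => rfl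
  | cons x t ih => simp [ih]

theorem pvJoin_nil_flatten (xs : List (List Char)) : PySem.Chars.join [] xs = xs.flatten := by
  induction xs with
  | nil => simp [PySem.Chars.join_nil]
  | cons p t ih =>
    cases t with
    | nil => simp [PySem.Chars.join_singleton]
    | cons q u =>
      rw [PySem.Chars.join_cons_cons, ih]
      simp

theorem pvDigitEq (w r m : Nat) (hr : r < w) :
    m % 10 ^ (w - r) / 10 ^ (w - 1 - r) = m % 10 ^ w / 10 ^ (w - 1 - r) % 10 := by
  have h1 : (10:Nat) ^ (w - r) = 10 * 10 ^ (w - 1 - r) := by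
    rw [← pow_succ']
    congr 1
    omega
  have h2 : (10:Nat) ^ w = 10 ^ (r + 1) * 10 ^ (w - 1 - r) := by
    rw [← pow_add]
    congr 1
    omega
  rw [h1, h2, Nat.mod_mul_left_div_self, Nat.mod_mul_left_div_self,
      Nat.mod_mod_of_dvd _ (dvd_pow_self 10 (Nat.succ_ne_zero r))]

theorem pvDigitLt (w r m : Nat) (hr : r < w) : m % 10 ^ (w - r) / 10 ^ (w - 1 - r) < 10 := by
  have h1 : (10:Nat) ^ (w - r) = 10 * 10 ^ (w - 1 - r) := by
    rw [← pow_succ']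
    congr 1
    omega
  have hpos : 0 < (10:Nat) ^ (w - 1 - r) := by positivity
  have hlt : m % 10 ^ (w - r) < 10 * 10 ^ (w - 1 - r) := h1 ▸ Nat.mod_lt m (by positivity)
  exact Nat.div_lt_of_lt_mul (by omega)

theorem pvHfStd (M D : Int) (w r : Nat) (hr : r < w)
    (hM : M = ((10 ^ (w - r) : Nat) : Int)) (hD : D = ((10 ^ (w - 1 - r) : Nat) : Int)) (m : Nat) :
    (PySem.Int.toStr (PySem.Int.floordiv (PySem.Int.mod (m : Int) M) D)).toList
      = [Nat.digitChar (m % 10 ^ w / 10 ^ (w - 1 - r) % 10)] := by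
  subst hM hD
  rw [PySem.Int.mod_natCast, PySem.Int.floordiv_natCast, PySem.Int.toList_toStr]
  rw [pvToChars_natCast, Nat.toDigits_of_lt_base (pvDigitLt w r m hr), pvDigitEq w r m hr]

theorem pvHfOnes (w : Nat) (hw : 0 < w) (m : Nat) :
    (PySem.Int.toStr (PySem.Int.mod (m : Int) 10)).toList
      = [Nat.digitChar (m % 10 ^ w / 10 ^ (w - 1 - (w - 1)) % 10)] := by
  have h10 : (10 : Int) = ((10 ^ (1:Nat) : Nat) : Int) := by norm_num
  rw [h10, PySem.Int.mod_natCast, PySem.Int.toList_toStr]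
  rw [pvToChars_natCast, Nat.toDigits_of_lt_base (by simpa using Nat.mod_lt m (by norm_num))]
  congr 1
  have he : w - 1 - (w - 1) = 0 := by omega
  rw [he]
  simp [Nat.mod_mod_of_dvd _ (dvd_pow_self 10 (by omega : w ≠ 0))]

theorem pvTailEq (xs : List String) :
    (PySem.List.pyRange 0 (xs.length : Int) 1).map (fun j => PySem.List.pyGetD xs j "" ++ "\n")
      = xs.map (fun s => s ++ "\n") := by
  have hc : (fun j => PySem.List.pyGetD xs j "" ++ "\n")
      = (fun s => s ++ "\n") ∘ (fun j => PySem.List.pyGetD xs j "") := rfl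
  rw [hc, ← List.map_map, PySem.List.map_pyGetD_pyRange_zero']

theorem pvRowEq (L W R P : Int) (w r : Nat) (hr : r < w)
    (hW : W = (w : Int)) (hR : R = (r : Int)) (hP : P = ((10 ^ w : Nat) : Int)) (f : Int → String)
    (hf : ∀ m : Nat, 1 ≤ m → (f (m : Int)).toList = [Nat.digitChar (m % 10 ^ w / 10 ^ (w - 1 - r) % 10)]) :
    (((PySem.List.pyRange 1 (L + 1) 1).map f).map String.toList).flatten
      = ((PySem.List.pyRange 1 (L + 1) 1).map
            (fun i => PySem.Str.zfill (PySem.Int.toStr (PySem.Int.mod i P)) W)).map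
          (fun col => (PySem.Str.pyGet? col R).getD ' ') := by
  subst hW hR hP
  rw [List.map_map, List.map_map]
  have hmain : ∀ i ∈ PySem.List.pyRange 1 (L + 1) 1,
      (String.toList ∘ f) i
        = [((fun col => (PySem.Str.pyGet? col ((r : Nat) : Int)).getD ' ') ∘
            (fun i => PySem.Str.zfill (PySem.Int.toStr (PySem.Int.mod i ((10 ^ w : Nat) : Int))) ((w : Nat) : Int))) i] := by
    intro i hi
    have hb := (PySem.List.mem_pyRange_one).mp hi
    obtain ⟨m, rfl⟩ : ∃ m : Nat, i = (m : Int) := ⟨i.toNat, by omega⟩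
    have hm1 : 1 ≤ m := by exact_mod_cast hb.1
    have hw0 : 0 < w := by omega
    have hpow : 0 < 10 ^ w := by positivity
    simp only [Function.comp]
    rw [hf m hm1]
    have hmod : PySem.Int.mod (m : Int) ((10 ^ w : Nat) : Int) = ((m % 10 ^ w : Nat) : Int) :=
      PySem.Int.mod_natCast m (10 ^ w)
    rw [hmod]
    congr 1
    -- compute the zfill column character
    have hcol : (PySem.Str.zfill (PySem.Int.toStr ((m % 10 ^ w : Nat) : Int)) ((w : Nat) : Int)).toList
        = (List.range w).map (fun r => Nat.digitChar ((m % 10 ^ w) / 10 ^ (w - 1 - r) % 10)) := by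
      have := pvZfill w (m % 10 ^ w) hw0 (Nat.mod_lt m hpow)
      rw [PySem.Str.toList_zfill, PySem.Int.toList_toStr]
      exact this
    rw [PySem.Str.pyGet?_natCast, hcol]
    rw [List.getElem?_map, List.getElem?_range hr]
    rfl
  rw [List.map_congr_left hmain]
  rw [pvFlatten_map_singleton]

-- ===== VERDICT =====
theorem make_input_alignment_spec : Claim_equal_make_input_alignment := by
  intro p q hdom hpre
  unfold Spec_make_input_alignment
  unfold make_input_alignment make_input_alignment_alt
  by_cases hmem : q ∈ ["isFastaSingleLoop", "isNoFastaSingleLoop", "isFastaMultipleLoops", "isNoFastaMultipleLoops"]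
  · simp [hmem]
  · simp only [if_neg hmem]
    have hp : p ≠ "" := by
      rcases hpre with h | h
      · exact h
      · exact absurd h hmem
    have hne : PySem.Str.splitlines p ≠ [] := pvSplitlines_ne_nil p hp
    rcases hlast : PySem.List.pyGet? (PySem.Str.splitlines p) (-1) with _ | last
    · exfalso
      rw [PySem.List.pyGet?_neg_one] at hlast
      exact hne (List.getLast?_eq_none_iff.mp hlast)
    · dsimp only
      have hLen : 0 ≤ PySem.Str.len last := by
        rw [PySem.Str.len_eq]
        positivity
      by_cases h1000 : (1000:Int) ≤ PySem.Str.len last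
      · have h100 : (100:Int) ≤ PySem.Str.len last := by omega
        have h10 : (10:Int) ≤ PySem.Str.len last := by omega
        simp only [if_pos h1000, if_pos h100, if_pos h10]
        simp only [PySem.List.foldl_append_singleton_eq_map, List.nil_append]
        norm_num
        rw [pvTailEq, show PySem.List.pyRange 0 4 1 = [0, 1, 2, 3] from by decide]
        simp only [List.map_cons, List.map_nil]
        have hrow0 := pvRowEq (PySem.Str.len last) 4 0 10000 4 0 (by omega) (by norm_num) (by norm_num)
          (by norm_num) (fun i => PySem.Int.toStr (PySem.Int.floordiv (PySem.Int.mod i 10000) 1000))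
          (fun m hm => pvHfStd 10000 1000 4 0 (by omega) (by norm_num) (by norm_num) m)
        have hrow1 := pvRowEq (PySem.Str.len last) 4 1 10000 4 1 (by omega) (by norm_num) (by norm_num)
          (by norm_num) (fun i => PySem.Int.toStr (PySem.Int.floordiv (PySem.Int.mod i 1000) 100))
          (fun m hm => pvHfStd 1000 100 4 1 (by omega) (by norm_num) (by norm_num) m)
        have hrow2 := pvRowEq (PySem.Str.len last) 4 2 10000 4 2 (by omega) (by norm_num) (by norm_num)
          (by norm_num) (fun i => PySem.Int.toStr (PySem.Int.floordiv (PySem.Int.mod i 100) 10))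
          (fun m hm => pvHfStd 100 10 4 2 (by omega) (by norm_num) (by norm_num) m)
        have hrow3 := pvRowEq (PySem.Str.len last) 4 3 10000 4 3 (by omega) (by norm_num) (by norm_num)
          (by norm_num) (fun i => PySem.Int.toStr (PySem.Int.mod i 10))
          (fun m hm => pvHfOnes 4 (by norm_num) m)
        norm_num at hrow0 hrow1 hrow2 hrow3
        apply String.toList_inj.mp
        simp only [PySem.Str.toList_join, String.toList_append, List.map_append, List.map_map]
        norm_num
        simp [pvJoin_nil_flatten, hrow0, hrow1, hrow2, hrow3]
      · by_cases h100 : (100:Int) ≤ PySem.Str.len last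
        · have h10 : (10:Int) ≤ PySem.Str.len last := by omega
          simp only [if_neg h1000, if_pos h100, if_pos h10]
          simp only [PySem.List.foldl_append_singleton_eq_map, List.nil_append]
          norm_num
          rw [pvTailEq, show PySem.List.pyRange 0 3 1 = [0, 1, 2] from by decide]
          simp only [List.map_cons, List.map_nil]
          have hrow0 := pvRowEq (PySem.Str.len last) 3 0 1000 3 0 (by omega) (by norm_num) (by norm_num)
            (by norm_num) (fun i => PySem.Int.toStr (PySem.Int.floordiv (PySem.Int.mod i 1000) 100))
            (fun m hm => pvHfStd 1000 100 3 0 (by omega) (by norm_num) (by norm_num) m)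
          have hrow1 := pvRowEq (PySem.Str.len last) 3 1 1000 3 1 (by omega) (by norm_num) (by norm_num)
            (by norm_num) (fun i => PySem.Int.toStr (PySem.Int.floordiv (PySem.Int.mod i 100) 10))
            (fun m hm => pvHfStd 100 10 3 1 (by omega) (by norm_num) (by norm_num) m)
          have hrow2 := pvRowEq (PySem.Str.len last) 3 2 1000 3 2 (by omega) (by norm_num) (by norm_num)
            (by norm_num) (fun i => PySem.Int.toStr (PySem.Int.mod i 10))
            (fun m hm => pvHfOnes 3 (by norm_num) m)
          norm_num at hrow0 hrow1 hrow2
          apply String.toList_inj.mp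
          simp only [PySem.Str.toList_join, String.toList_append, List.map_append, List.map_map]
          norm_num
          simp [pvJoin_nil_flatten, hrow0, hrow1, hrow2]
        · by_cases h10 : (10:Int) ≤ PySem.Str.len last
          · simp only [if_neg h1000, if_neg h100, if_pos h10]
            simp only [PySem.List.foldl_append_singleton_eq_map, List.nil_append]
            norm_num
            rw [pvTailEq, show PySem.List.pyRange 0 2 1 = [0, 1] from by decide]
            simp only [List.map_cons, List.map_nil]
            have hrow0 := pvRowEq (PySem.Str.len last) 2 0 100 2 0 (by omega) (by norm_num) (by norm_num)
              (by norm_num) (fun i => PySem.Int.toStr (PySem.Int.floordiv (PySem.Int.mod i 100) 10))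
              (fun m hm => pvHfStd 100 10 2 0 (by omega) (by norm_num) (by norm_num) m)
            have hrow1 := pvRowEq (PySem.Str.len last) 2 1 100 2 1 (by omega) (by norm_num) (by norm_num)
              (by norm_num) (fun i => PySem.Int.toStr (PySem.Int.mod i 10))
              (fun m hm => pvHfOnes 2 (by norm_num) m)
            norm_num at hrow0 hrow1
            apply String.toList_inj.mp
            simp only [PySem.Str.toList_join, String.toList_append, List.map_append, List.map_map]
            norm_num
            simp [pvJoin_nil_flatten, hrow0, hrow1]
          · -- w = 1
            simp only [if_neg h1000, if_neg h100, if_neg h10]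
            simp only [PySem.List.foldl_append_singleton_eq_map, List.nil_append]
            norm_num
            rw [pvTailEq, show PySem.List.pyRange 0 1 1 = [0] from by decide]
            simp only [List.map_cons, List.map_nil]
            have hrow := pvRowEq (PySem.Str.len last) 1 0 10 1 0 (by omega) (by norm_num) (by norm_num)
              (by norm_num) (fun i => PySem.Int.toStr (PySem.Int.mod i 10))
              (fun m hm => pvHfOnes 1 (by norm_num) m)
            norm_num at hrow
            apply String.toList_inj.mp
            simp only [PySem.Str.toList_join, String.toList_append, List.map_append, List.map_map]
            norm_num
            simp [pvJoin_nil_flatten, hrow]
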